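-- pv_equiv track=rewrite | github.com/sulaiman-07389/CS-102-DSA | SortMatrixByRow.py | sort_matrix_by_row
-- ===== SOURCE A (Python) =====
-- def sort_matrix_by_row(x):
--     for lst in x:
--         for i in range(len(lst)):
--             small = i
--             for j in range(i+1, len(lst)):
--                 if lst[small] > lst[j]:
--                     small = j
--
--             lst[i], lst[small] = lst[small], lst[i]
--     return x
-- ===== SOURCE B (Python) =====
-- def sort_matrix_by_row(x):
--     for lst in x:
--         lst[:] = sorted(lst)
--     return x
-- ===== Notes on version B (the rewrite author's own statement) =====
-- stated objective: faster
-- what changed: Replaces the hand-rolled O(n^2) selection sort of each row with the library sort (timsort) written back in place via slice assignment.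
import Mathlib
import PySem

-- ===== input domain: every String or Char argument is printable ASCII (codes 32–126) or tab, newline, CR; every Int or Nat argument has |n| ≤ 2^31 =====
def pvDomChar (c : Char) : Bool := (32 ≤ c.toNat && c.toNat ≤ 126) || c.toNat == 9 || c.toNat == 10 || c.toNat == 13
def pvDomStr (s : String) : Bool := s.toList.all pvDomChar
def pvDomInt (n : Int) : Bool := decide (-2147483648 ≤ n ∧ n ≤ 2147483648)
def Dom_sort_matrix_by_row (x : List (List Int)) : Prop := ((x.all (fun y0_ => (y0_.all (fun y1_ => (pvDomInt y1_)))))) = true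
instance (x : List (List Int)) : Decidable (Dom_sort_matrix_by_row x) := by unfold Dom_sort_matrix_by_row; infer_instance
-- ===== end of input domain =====

-- B replaces A's per-row selection sort by the library sort (objective: faster, asymptotic).
-- A mutates each row of x in place and returns x; B performs the same mutation (lst[:] = sorted(lst));
-- the equivalence proved here is about the return value.

-- ===== PORT A =====
-- inner loop: 'for j in range(i+1, len(lst)): if lst[small] > lst[j]: small = j'
-- (restricted to the suffix starting at i, so indices are relative to the suffix)
def pvInner (l : List Int) (j si : Nat) : Nat :=
  if j < l.length then
    pvInner l (j + 1) (if l.getD si 0 > l.getD j 0 then j else si)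
  else si
termination_by l.length - j

-- one row: the outer loop 'for i in range(len(lst)): …swap…' as the obvious structural
-- recursion over the untouched suffix; each step finds the argmin index and swaps it with
-- position 0 of the suffix (lst[i], lst[small] = lst[small], lst[i]).
def pvSelSort (l : List Int) : List Int :=
  match l with
  | [] => []
  | a :: t =>
    let si := pvInner (a :: t) 1 0
    let m := (a :: t).getD si 0
    m :: pvSelSort (((a :: t).set si a).tail)
termination_by l.length
decreasing_by simp [List.length_set]

def sort_matrix_by_row (x : List (List Int)) : List (List Int) :=
  x.map pvSelSort

-- ===== PORT B =====
def sort_matrix_by_row_alt (x : List (List Int)) : List (List Int) :=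
  x.map (fun lst => PySem.List.sorted lst (fun v => v) false)

-- ===== PRECONDITION & SPEC =====
def Spec_sort_matrix_by_row (x : List (List Int)) (out : List (List Int)) : Prop := out = sort_matrix_by_row_alt x
instance (x : List (List Int)) (out : List (List Int)) : Decidable (Spec_sort_matrix_by_row x out) := by unfold Spec_sort_matrix_by_row; infer_instance

-- ===== CLAIM (what is proved, stated in full; the proofs are below) =====
def Claim_equal_sort_matrix_by_row : Prop := ∀ (x : List (List Int)), Dom_sort_matrix_by_row x → Spec_sort_matrix_by_row x (sort_matrix_by_row x)

-- ===== LEMMAS AND PROOFS =====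

-- pvInner scans indices j, j+1, … keeping the index of the least element seen so far
theorem pvInner_spec_aux (l : List Int) (n : Nat) : ∀ j si, l.length ≤ j + n → si < l.length →
    (∀ k, k < j → k < l.length → l.getD si 0 ≤ l.getD k 0) →
    pvInner l j si < l.length ∧ ∀ k, k < l.length → l.getD (pvInner l j si) 0 ≤ l.getD k 0 := by
  induction n with
  | zero =>
    intro j si hn hsi hmin
    rw [pvInner, if_neg (by omega)]
    exact ⟨hsi, fun k hk => hmin k (by omega) hk⟩
  | succ n ih =>
    intro j si hn hsi hmin
    rw [pvInner]
    by_cases hj : j < l.length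
    · rw [if_pos hj]
      apply ih (j + 1)
      · omega
      · split <;> [exact hj; exact hsi]
      · intro k hk hkl
        split
        · next hc =>
          rcases Nat.lt_succ_iff_lt_or_eq.mp hk with h | h
          · exact le_trans (le_of_lt hc) (hmin k h hkl)
          · subst h; exact le_refl _
        · next hc =>
          rcases Nat.lt_succ_iff_lt_or_eq.mp hk with h | h
          · exact hmin k h hkl
          · subst h; omega
    · rw [if_neg hj]
      exact ⟨hsi, fun k hk => hmin k (by omega) hk⟩

theorem pvInner_spec (l : List Int) (hl : 0 < l.length) :
    pvInner l 1 0 < l.length ∧ ∀ k, k < l.length → l.getD (pvInner l 1 0) 0 ≤ l.getD k 0 := by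
  apply pvInner_spec_aux l l.length 1 0 (by omega) hl
  intro k hk _
  interval_cases k
  exact le_refl _

-- swapping the element at index k of t with a new head a is a permutation
theorem swap_perm_aux (a : Int) (t : List Int) : ∀ k, k < t.length →
    (t.getD k 0 :: t.set k a).Perm (a :: t) := by
  induction t with
  | nil => intro k hk; exact absurd hk (by simp)
  | cons b r ih =>
    intro k hk
    cases k with
    | zero => exact List.Perm.swap a b r
    | succ k =>
      simp only [List.getD_cons_succ, List.set_cons_succ]
      exact (List.Perm.swap b _ _).trans (((ih k (by simpa using hk)).cons b).trans (List.Perm.swap a b r))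

-- swapping index si with the head is a permutation
theorem swap_perm (a : Int) (t : List Int) (si : Nat) (h : si < (a :: t).length) :
    ((a :: t).getD si 0 :: ((a :: t).set si a).tail).Perm (a :: t) := by
  cases si with
  | zero => simp
  | succ si =>
    simp only [List.getD_cons_succ, List.set_cons_succ, List.tail_cons]
    exact swap_perm_aux a t si (by simpa using h)

theorem pvSelSort_perm (l : List Int) : (pvSelSort l).Perm l := by
  induction hn : l.length using Nat.strong_induction_on generalizing l with
  | _ n ih =>
    cases l with
    | nil => simp [pvSelSort]
    | cons a t =>
      rw [pvSelSort]
      have hlt := (pvInner_spec (a :: t) (by simp)).1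
      have hperm := swap_perm a t (pvInner (a :: t) 1 0) hlt
      have hlen : (((a :: t).set (pvInner (a :: t) 1 0) a).tail).length = t.length := by
        simp [List.length_set]
      have ihp := ih t.length (by simp at hn; omega) _ hlen
      exact (ihp.cons _).trans hperm

theorem pvSelSort_pairwise (l : List Int) : (pvSelSort l).Pairwise (· ≤ ·) := by
  induction hn : l.length using Nat.strong_induction_on generalizing l with
  | _ n ih =>
    cases l with
    | nil => simp [pvSelSort]
    | cons a t =>
      rw [pvSelSort]
      have hspec := pvInner_spec (a :: t) (by simp)
      have hperm := swap_perm a t (pvInner (a :: t) 1 0) hspec.1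
      have hlen : (((a :: t).set (pvInner (a :: t) 1 0) a).tail).length = t.length := by
        simp [List.length_set]
      refine List.Pairwise.cons ?_ (ih t.length (by simp at hn; omega) _ hlen)
      intro x hx
      -- x is an element of the original list, and the selected element is minimal
      have hx' : x ∈ (a :: t) := by
        have h1 : x ∈ ((a :: t).set (pvInner (a :: t) 1 0) a).tail :=
          (pvSelSort_perm _).mem_iff.mp hx
        exact hperm.mem_iff.mp (List.mem_cons_of_mem _ h1)
      obtain ⟨k, hk, rfl⟩ := List.mem_iff_getElem.mp hx'
      have h2 := hspec.2 k hk
      rwa [List.getD_eq_getElem _ _ hk] at h2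

theorem pvSelSort_eq_sorted (l : List Int) :
    pvSelSort l = PySem.List.sorted l (fun v => v) false := by
  exact (PySem.List.sorted_id_eq_of_perm_of_pairwise l (pvSelSort l) (pvSelSort_perm l) (pvSelSort_pairwise l)).symm
-- ===== VERDICT (by name: the statement is the Claim_ definition above) =====
theorem sort_matrix_by_row_spec : Claim_equal_sort_matrix_by_row := by
  intro x _
  unfold Spec_sort_matrix_by_row sort_matrix_by_row sort_matrix_by_row_alt
  exact List.map_congr_left (fun l _ => pvSelSort_eq_sorted l)
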